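-- pv_equiv track=rewrite | github.com/artilugio0/competitive-programming-problems | codeforces_contest_2044E.py | solve
-- ===== SOURCE A (Python) =====
-- def solve(k, l1, r1, l2, r2):
--     count = 0
--     for n in range(32+1):
--         if l1*(k**n) > r2:
--             break
--
--         if r1*(k**n) < l2:
--             continue
--
--         a = l1
--         b = r1
--         while a <= b:
--             minx = (a+b)//2
--             if minx*(k**n) < l2:
--                 a = minx+1
--             else:
--                 b = minx-1
--
--         if b < l1 or b*(k**n) < l2:
--             minx = a
--         else:
--             minx = b
--
--         a = l1
--         b = r1
--         while a <= b:
--             maxx = (a+b)//2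
--             if maxx*(k**n) > r2:
--                 b = maxx-1
--             else:
--                 a = maxx+1
--
--         if a > r1 or a*(k**n) > r2:
--             maxx = b
--         else:
--             maxx = a
--
--         count += maxx - minx + 1
--
--     return count
-- ===== SOURCE B (Python) =====
-- def solve(k, l1, r1, l2, r2):
--     count = 0
--     p = 1
--     for n in range(32 + 1):
--         if l1 * p > r2:
--             break
--         if r1 * p >= l2:
--             minx = max(l1, -(-l2 // p))
--             maxx = min(r1, r2 // p)
--             count += maxx - minx + 1
--         p *= k
--     return count
-- ===== Notes on version B (the rewrite author's own statement) =====
-- stated objective: simpler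
-- what changed: Both per-exponent binary searches are replaced by closed-form clamped ceiling/floor divisions (minx = max(l1, -(-l2//p)), maxx = min(r1, r2//p)), and k**n is replaced by an accumulated power.
-- outside the precondition, e.g. on solve(0, 1, 5, 0, 10): A returns 165, B raises ZeroDivisionError; on solve(-5, 0, -24, -43, 30): A returns -391, B returns -415
import Mathlib
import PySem

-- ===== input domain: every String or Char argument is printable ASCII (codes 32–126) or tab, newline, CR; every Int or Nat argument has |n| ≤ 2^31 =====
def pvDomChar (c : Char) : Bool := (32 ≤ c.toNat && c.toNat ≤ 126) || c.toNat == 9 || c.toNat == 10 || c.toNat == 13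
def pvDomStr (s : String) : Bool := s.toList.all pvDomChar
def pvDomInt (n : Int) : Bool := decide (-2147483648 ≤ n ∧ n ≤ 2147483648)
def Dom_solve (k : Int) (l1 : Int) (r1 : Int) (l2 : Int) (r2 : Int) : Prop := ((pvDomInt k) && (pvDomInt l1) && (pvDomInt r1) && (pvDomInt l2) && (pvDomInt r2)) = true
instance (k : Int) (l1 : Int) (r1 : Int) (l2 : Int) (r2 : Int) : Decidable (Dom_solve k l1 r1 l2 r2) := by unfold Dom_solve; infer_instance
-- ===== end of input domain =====

-- B replaces A's two per-exponent binary searches by closed-form floor/ceiling divisions (simpler, one accumulated power instead of k**n).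

-- ===== PORT A =====
-- first while-loop of A: binary search for the smallest x with x*p ≥ l2; returns final (a, b)
def solveSearchMin (p l2 a b : Int) : Int × Int :=
  if h : a ≤ b then
    let minx := PySem.Int.floordiv (a + b) 2
    if minx * p < l2 then solveSearchMin p l2 (minx + 1) b
    else solveSearchMin p l2 a (minx - 1)
  else (a, b)
termination_by (b + 1 - a).toNat
decreasing_by
  · have := PySem.Int.floordiv_two_mid_bounds h; omega
  · have := PySem.Int.floordiv_two_mid_bounds h; omega

-- second while-loop of A: binary search for the largest x with x*p ≤ r2; returns final (a, b)
def solveSearchMax (p r2 a b : Int) : Int × Int :=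
  if h : a ≤ b then
    let maxx := PySem.Int.floordiv (a + b) 2
    if maxx * p > r2 then solveSearchMax p r2 a (maxx - 1)
    else solveSearchMax p r2 (maxx + 1) b
  else (a, b)
termination_by (b + 1 - a).toNat
decreasing_by
  · have := PySem.Int.floordiv_two_mid_bounds h; omega
  · have := PySem.Int.floordiv_two_mid_bounds h; omega

-- one loop-body iteration of A (after the break/continue guards): the amount added to count
def solveStep (l1 r1 l2 r2 p : Int) : Int :=
  let s1 := solveSearchMin p l2 l1 r1
  let minx := if s1.2 < l1 ∨ s1.2 * p < l2 then s1.1 else s1.2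
  let s2 := solveSearchMax p r2 l1 r1
  let maxx := if s2.1 > r1 ∨ s2.1 * p > r2 then s2.2 else s2.1
  maxx - minx + 1

-- the for n in range(32+1) loop with break/continue
def solveGo (k l1 r1 l2 r2 : Int) (count : Int) (n : Nat) : Int :=
  if n ≤ 32 then
    let p := k ^ n
    if l1 * p > r2 then count
    else if r1 * p < l2 then solveGo k l1 r1 l2 r2 count (n + 1)
    else solveGo k l1 r1 l2 r2 (count + solveStep l1 r1 l2 r2 p) (n + 1)
  else count
termination_by 33 - n

def solve (k : Int) (l1 : Int) (r1 : Int) (l2 : Int) (r2 : Int) : Int :=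
  solveGo k l1 r1 l2 r2 0 0

-- ===== PORT B =====
-- B's for-loop: accumulated power p, closed-form minx/maxx via floor/ceiling division
def solveAltGo (k l1 r1 l2 r2 : Int) (count p : Int) (n : Nat) : Int :=
  if n ≤ 32 then
    if l1 * p > r2 then count
    else if r1 * p ≥ l2 then
      let minx := max l1 (-(PySem.Int.floordiv (-l2) p))
      let maxx := min r1 (PySem.Int.floordiv r2 p)
      solveAltGo k l1 r1 l2 r2 (count + (maxx - minx + 1)) (p * k) (n + 1)
    else solveAltGo k l1 r1 l2 r2 count (p * k) (n + 1)
  else count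
termination_by 33 - n

def solve_alt (k : Int) (l1 : Int) (r1 : Int) (l2 : Int) (r2 : Int) : Int :=
  solveAltGo k l1 r1 l2 r2 0 1 0

-- ===== PRECONDITION & SPEC =====
-- Pre_ excludes k ≤ 0, outside the problem's natural domain (k ≥ 2): for k = 0 B's division by p = k^n raises
-- ZeroDivisionError while A returns, and for k < 0 x ↦ x*k^n is not monotone, so A's binary-search results are
-- accidental values no specification would fix.
def Pre_solve (k : Int) (l1 : Int) (r1 : Int) (l2 : Int) (r2 : Int) : Prop := 1 ≤ k
instance (k : Int) (l1 : Int) (r1 : Int) (l2 : Int) (r2 : Int) : Decidable (Pre_solve k l1 r1 l2 r2) := by unfold Pre_solve; infer_instance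
def pvWitness_solve : Int × Int × Int × Int × Int := (2, 1, 1000000, 1, 1000000000)

def Spec_solve (k : Int) (l1 : Int) (r1 : Int) (l2 : Int) (r2 : Int) (out : Int) : Prop := out = solve_alt k l1 r1 l2 r2
instance (k : Int) (l1 : Int) (r1 : Int) (l2 : Int) (r2 : Int) (out : Int) : Decidable (Spec_solve k l1 r1 l2 r2 out) := by unfold Spec_solve; infer_instance

-- ===== CLAIM (what is proved, stated in full; the proofs are below) =====
def Claim_equal_solve : Prop := ∀ (k : Int) (l1 : Int) (r1 : Int) (l2 : Int) (r2 : Int), Dom_solve k l1 r1 l2 r2 → Pre_solve k l1 r1 l2 r2 → Spec_solve k l1 r1 l2 r2 (solve k l1 r1 l2 r2)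

-- ===== LEMMAS AND PROOFS =====

-- characterisation of A's first binary search: with c the least x with l2 ≤ x*p, the loop ends at a = max a₀ (min (b₀+1) c), b = a-1
lemma searchMin_eq (p l2 c : Int) (hc : ∀ x : Int, l2 ≤ x * p ↔ c ≤ x) :
    ∀ m : Nat, ∀ a b : Int, (b + 1 - a).toNat ≤ m → a ≤ b + 1 →
      solveSearchMin p l2 a b = (max a (min (b + 1) c), max a (min (b + 1) c) - 1) := by
  intro m
  induction m with
  | zero =>
    intro a b hm hab
    rw [solveSearchMin]
    have h : ¬ a ≤ b := by omega
    rw [dif_neg h]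
    simp only [Prod.mk.injEq]
    omega
  | succ m ih =>
    intro a b hm hab
    rw [solveSearchMin]
    by_cases h : a ≤ b
    · have hmid := PySem.Int.floordiv_two_mid_bounds h
      simp only [h, dif_pos]
      set mid := PySem.Int.floordiv (a + b) 2 with hmdef
      by_cases h2 : mid * p < l2
      · have hcm : ¬ c ≤ mid := by have := hc mid; omega
        simp only [h2, if_pos]
        rw [ih (mid + 1) b (by omega) (by omega)]
        simp only [Prod.mk.injEq]
        omega
      · have hcm : c ≤ mid := by have := hc mid; omega
        simp only [h2, if_neg, not_false_iff]
        rw [ih a (mid - 1) (by omega) (by omega)]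
        simp only [Prod.mk.injEq]
        omega
    · rw [dif_neg h]
      simp only [Prod.mk.injEq]
      omega

-- characterisation of A's second binary search: with d the greatest x with x*p ≤ r2, the loop ends at b = min b₀ (max (a₀-1) d), a = b+1
lemma searchMax_eq (p r2 d : Int) (hd : ∀ x : Int, x * p ≤ r2 ↔ x ≤ d) :
    ∀ m : Nat, ∀ a b : Int, (b + 1 - a).toNat ≤ m → a ≤ b + 1 →
      solveSearchMax p r2 a b = (min b (max (a - 1) d) + 1, min b (max (a - 1) d)) := by
  intro m
  induction m with
  | zero =>
    intro a b hm hab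
    rw [solveSearchMax]
    have h : ¬ a ≤ b := by omega
    rw [dif_neg h]
    simp only [Prod.mk.injEq]
    omega
  | succ m ih =>
    intro a b hm hab
    rw [solveSearchMax]
    by_cases h : a ≤ b
    · have hmid := PySem.Int.floordiv_two_mid_bounds h
      simp only [h, dif_pos]
      set mid := PySem.Int.floordiv (a + b) 2 with hmdef
      by_cases h2 : mid * p > r2
      · have hdm : ¬ mid ≤ d := by have := hd mid; omega
        simp only [h2, if_pos]
        rw [ih a (mid - 1) (by omega) (by omega)]
        simp only [Prod.mk.injEq]
        omega
      · have hdm : mid ≤ d := by have := hd mid; omega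
        simp only [h2, if_neg, not_false_iff]
        rw [ih (mid + 1) b (by omega) (by omega)]
        simp only [Prod.mk.injEq]
        omega
    · rw [dif_neg h]
      simp only [Prod.mk.injEq]
      omega

-- ceiling division characterises the least x with l2 ≤ x*p
lemma ceil_char (p l2 : Int) (hp : 0 < p) :
    ∀ x : Int, l2 ≤ x * p ↔ -(PySem.Int.floordiv (-l2) p) ≤ x := by
  intro x
  have h := PySem.Int.le_floordiv_iff_mul_le (a := -l2) (b := p) (q := -x) hp
  rw [neg_mul] at h
  omega

-- floor division characterises the greatest x with x*p ≤ r2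
lemma floor_char (p r2 : Int) (hp : 0 < p) :
    ∀ x : Int, x * p ≤ r2 ↔ x ≤ PySem.Int.floordiv r2 p := by
  intro x
  have h := PySem.Int.le_floordiv_iff_mul_le (a := r2) (b := p) (q := x) hp
  omega

-- under the two loop guards, A's per-iteration contribution equals B's closed form
lemma step_eq (l1 r1 l2 r2 p : Int) (hp : 0 < p)
    (hg1 : ¬ l1 * p > r2) (hg2 : ¬ r1 * p < l2) :
    solveStep l1 r1 l2 r2 p =
      min r1 (PySem.Int.floordiv r2 p) - max l1 (-(PySem.Int.floordiv (-l2) p)) + 1 := by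
  have hc := ceil_char p l2 hp
  have hd := floor_char p r2 hp
  set c := -(PySem.Int.floordiv (-l2) p) with hcdef
  set d := PySem.Int.floordiv r2 p with hddef
  have hcr : c ≤ r1 := by have := hc r1; omega
  have hld : l1 ≤ d := by have := hd l1; omega
  unfold solveStep
  by_cases hlr : l1 ≤ r1 + 1
  · rw [searchMin_eq p l2 c hc (r1 + 1 - l1).toNat l1 r1 (by omega) hlr]
    rw [searchMax_eq p r2 d hd (r1 + 1 - l1).toNat l1 r1 (by omega) hlr]
    simp only
    have hminx :
        (if max l1 (min (r1 + 1) c) - 1 < l1 ∨ (max l1 (min (r1 + 1) c) - 1) * p < l2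
         then max l1 (min (r1 + 1) c) else max l1 (min (r1 + 1) c) - 1) = max l1 c := by
      by_cases hb : max l1 (min (r1 + 1) c) - 1 < l1 ∨ (max l1 (min (r1 + 1) c) - 1) * p < l2
      · simp only [hb, if_pos]; omega
      · exfalso
        have := hc (max l1 (min (r1 + 1) c) - 1)
        omega
    have hmaxx :
        (if min r1 (max (l1 - 1) d) + 1 > r1 ∨ (min r1 (max (l1 - 1) d) + 1) * p > r2
         then min r1 (max (l1 - 1) d) else min r1 (max (l1 - 1) d) + 1) = min r1 d := by
      by_cases hb : min r1 (max (l1 - 1) d) + 1 > r1 ∨ (min r1 (max (l1 - 1) d) + 1) * p > r2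
      · simp only [hb, if_pos]; omega
      · exfalso
        have := hd (min r1 (max (l1 - 1) d) + 1)
        omega
    rw [hminx, hmaxx]
  · -- l1 > r1 + 1: both searches return immediately with (l1, r1)
    rw [solveSearchMin, solveSearchMax]
    have h : ¬ l1 ≤ r1 := by omega
    simp only [h, dif_neg, not_false_iff]
    have hminx : (if r1 < l1 ∨ r1 * p < l2 then l1 else r1) = l1 := by
      simp only [show r1 < l1 ∨ r1 * p < l2 from Or.inl (by omega), if_pos]
    have hmaxx : (if l1 > r1 ∨ l1 * p > r2 then r1 else l1) = r1 := by
      simp only [show l1 > r1 ∨ l1 * p > r2 from Or.inl (by omega), if_pos]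
    rw [hminx, hmaxx]
    omega

-- the two loops agree step by step (p of B tracks k^n of A)
lemma go_eq (k l1 r1 l2 r2 : Int) (hk : 1 ≤ k) :
    ∀ m : Nat, ∀ n : Nat, 33 - n ≤ m → ∀ count : Int,
      solveGo k l1 r1 l2 r2 count n = solveAltGo k l1 r1 l2 r2 count (k ^ n) n := by
  intro m
  induction m with
  | zero =>
    intro n hn count
    rw [solveGo, solveAltGo]
    have h : ¬ n ≤ 32 := by omega
    simp only [h, if_neg, not_false_iff]
  | succ m ih =>
    intro n hn count
    rw [solveGo, solveAltGo]
    by_cases h : n ≤ 32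
    · simp only [h, if_pos]
      have hp : 0 < k ^ n := pow_pos (by omega) n
      by_cases hg1 : l1 * k ^ n > r2
      · simp only [hg1, if_pos]
      · simp only [hg1, if_neg, not_false_iff]
        by_cases hg2 : r1 * k ^ n < l2
        · have hg2' : ¬ r1 * k ^ n ≥ l2 := by omega
          simp only [hg2, hg2', if_pos, if_neg, not_false_iff]
          rw [ih (n + 1) (by omega) count, ← pow_succ]
        · have hg2' : r1 * k ^ n ≥ l2 := by omega
          simp only [hg2, hg2', if_pos, if_neg, not_false_iff]
          rw [ih (n + 1) (by omega), ← pow_succ,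
            step_eq l1 r1 l2 r2 (k ^ n) hp hg1 hg2]
    · simp only [h, if_neg, not_false_iff]

-- ===== VERDICT (by name: the statement is the Claim_ definition above) =====
theorem solve_spec : Claim_equal_solve := by
  intro k l1 r1 l2 r2 _ hk
  unfold Spec_solve solve solve_alt
  have := go_eq k l1 r1 l2 r2 hk 33 0 (by omega) 0
  simpa using this
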